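-- pv_equiv track=rewrite | github.com/VijCodes/Code-Forces | F_Longest_Strike.py | find_longest_good_subsequence
-- ===== SOURCE A (Python) =====
-- from collections import Counter
--
-- def find_longest_good_subsequence(n, k, a):
--     counter = Counter(a)
--     good_numbers = sorted(val for val, cnt in counter.items() if cnt >= k)
--
--     if not good_numbers:
--         return -1, -1
--
--     left = 0
--     max_length = 1
--     ansl, ansr = good_numbers[0], good_numbers[0]
--
--     for right in range(1, len(good_numbers)):
--         if good_numbers[right] != good_numbers[right - 1] + 1:
--             left = right
--         elif right - left + 1 > max_length:
--             max_length = right - left + 1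
--             ansl, ansr = good_numbers[left], good_numbers[right]
--
--     return ansl, ansr
-- ===== SOURCE B (Python) =====
-- from collections import Counter
--
-- def find_longest_good_subsequence(n, k, a):
--     cnt = Counter(a)
--     good = {v for v, c in cnt.items() if c >= k}
--     best = None  # (length, start), max length, ties -> smallest start
--     for x in good:
--         if x - 1 not in good:
--             length = 1
--             while x + length in good:
--                 length += 1
--             if best is None or length > best[0] or (length == best[0] and x < best[1]):
--                 best = (length, x)
--     if best is None:
--         return -1, -1
--     return best[1], best[1] + best[0] - 1
-- ===== Notes on version B (the rewrite author's own statement) =====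
-- stated objective: alternative
-- what changed: Replaces A's sort of the good values plus index-based sliding-window scan by a hash-set scan: build the set of values with count >= k, and for each value with no predecessor in the set walk the run upward, keeping the longest run with the smallest start.
import Mathlib
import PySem

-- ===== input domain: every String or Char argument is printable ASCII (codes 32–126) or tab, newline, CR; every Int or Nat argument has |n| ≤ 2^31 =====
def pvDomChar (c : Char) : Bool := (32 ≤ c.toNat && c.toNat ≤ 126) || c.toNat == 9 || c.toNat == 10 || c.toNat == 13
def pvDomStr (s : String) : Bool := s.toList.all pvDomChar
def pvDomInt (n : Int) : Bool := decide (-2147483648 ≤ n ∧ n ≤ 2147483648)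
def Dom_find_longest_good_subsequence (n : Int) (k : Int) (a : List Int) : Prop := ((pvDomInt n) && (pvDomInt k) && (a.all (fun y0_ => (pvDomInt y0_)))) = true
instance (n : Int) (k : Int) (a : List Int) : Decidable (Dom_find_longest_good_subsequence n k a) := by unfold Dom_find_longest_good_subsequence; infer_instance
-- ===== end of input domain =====

-- B replaces A's sort + sliding window by a hash-set scan: for each value whose count ≥ k that has
-- no predecessor in the set it walks the run upward, keeping the longest run (ties: smallest start).

-- ===== PORT A =====
def find_longest_good_subsequence (n : Int) (k : Int) (a : List Int) : Int × Int :=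
  let counter := PySem.Dict.counter a
  let good_numbers := PySem.List.sorted (counter.items.filterMap (fun p => if p.2 ≥ k then some p.1 else none)) (fun v => v) false
  if good_numbers = [] then (-1, -1)
  else
    let g0 := PySem.List.pyGetD good_numbers 0 0
    let st := (PySem.List.pyRange 1 (PySem.List.len good_numbers) 1).foldl
      (fun (s : Int × Int × Int × Int) r =>
        if PySem.List.pyGetD good_numbers r 0 ≠ PySem.List.pyGetD good_numbers (r - 1) 0 + 1 then
          (r, s.2.1, s.2.2.1, s.2.2.2)
        else if r - s.1 + 1 > s.2.1 then
          (s.1, r - s.1 + 1, PySem.List.pyGetD good_numbers s.1 0, PySem.List.pyGetD good_numbers r 0)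
        else s)
      (0, 1, g0, g0)
    (st.2.2.1, st.2.2.2)

-- ===== PORT B =====
-- the 'while x + length in good' loop: fuel good.length bounds its iteration count
-- (each successful test adds one more distinct member of good to the run)
def pvWalk (good : PySem.Set Int) (x : Int) : Nat → Int → Int
  | 0, length => length
  | fuel + 1, length =>
    if PySem.Set.contains good (x + length) then pvWalk good x fuel (length + 1) else length

-- B consumes the set in its (insertion-order) element order; the best-run selection below is
-- proved order-independent, matching Python's unspecified set iteration order.
def find_longest_good_subsequence_alt (n : Int) (k : Int) (a : List Int) : Int × Int :=
  let cnt := PySem.Dict.counter a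
  let good : PySem.Set Int := PySem.Set.ofList (cnt.items.filterMap (fun p => if p.2 ≥ k then some p.1 else none))
  let best := good.foldl
    (fun (best : Option (Int × Int)) x =>
      if PySem.Set.contains good (x - 1) then best
      else
        let length := pvWalk good x good.length 1
        match best with
        | none => some (length, x)
        | some (bl, bs) =>
          if length > bl ∨ (length = bl ∧ x < bs) then some (length, x) else some (bl, bs))
    none
  match best with
  | none => (-1, -1)
  | some (bl, bs) => (bs, bs + bl - 1)

-- ===== PRECONDITION & SPEC =====
def Spec_find_longest_good_subsequence (n : Int) (k : Int) (a : List Int) (out : Int × Int) : Prop := out = find_longest_good_subsequence_alt n k a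
instance (n : Int) (k : Int) (a : List Int) (out : Int × Int) : Decidable (Spec_find_longest_good_subsequence n k a out) := by unfold Spec_find_longest_good_subsequence; infer_instance

-- ===== CLAIM (what is proved, stated in full; the proofs are below) =====
def Claim_equal_find_longest_good_subsequence : Prop := ∀ (n : Int) (k : Int) (a : List Int), Dom_find_longest_good_subsequence n k a → Spec_find_longest_good_subsequence n k a (find_longest_good_subsequence n k a)

-- ===== LEMMAS AND PROOFS =====

-- the first-better-of-two selection B performs (keep the old on a full tie)
def pvBetter (b : Option (Int × Int)) (c : Int × Int) : Option (Int × Int) :=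
  match b with
  | none => some c
  | some (bl, bs) => if c.1 > bl ∨ (c.1 = bl ∧ c.2 < bs) then some c else some (bl, bs)

-- B's loop body, abstracted over the membership list S and the walk fuel F
def pvBStep (S : List Int) (F : Nat) (best : Option (Int × Int)) (x : Int) : Option (Int × Int) :=
  if PySem.Set.contains S (x - 1) then best else pvBetter best (pvWalk S x F 1, x)

-- maximal consecutive extension: pvTakeRun x xs = (L, rest) with x :: xs = [x, x+1, …, x+L-1] ++ rest
def pvTakeRun : Int → List Int → Int × List Int
  | _, [] => (1, [])
  | x, y :: ys => if y = x + 1 then ((pvTakeRun y ys).1 + 1, (pvTakeRun y ys).2) else (1, y :: ys)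

lemma pvTakeRun_one_le (x : Int) (xs : List Int) : 1 ≤ (pvTakeRun x xs).1 := by
  induction xs generalizing x with
  | nil => simp [pvTakeRun]
  | cons y ys ih =>
    simp only [pvTakeRun]
    split
    · have := ih y; omega
    · omega

lemma pvTakeRun_len (x : Int) (xs : List Int) :
    (pvTakeRun x xs).1 + ((pvTakeRun x xs).2.length : Int) = (xs.length : Int) + 1 := by
  induction xs generalizing x with
  | nil => simp [pvTakeRun]
  | cons y ys ih =>
    simp only [pvTakeRun]
    split
    · have := ih y; simp only [List.length_cons]; push_cast; omega
    · simp only [List.length_cons]; push_cast; omega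

lemma pvTakeRun_decomp (x : Int) (xs : List Int) :
    x :: xs = PySem.List.pyRange x (x + (pvTakeRun x xs).1) 1 ++ (pvTakeRun x xs).2 := by
  induction xs generalizing x with
  | nil =>
    simp only [pvTakeRun]
    rw [PySem.List.pyRange_one_cons (by omega)]
    rw [PySem.List.pyRange_one_eq_nil (by omega)]
    simp
  | cons y ys ih =>
    simp only [pvTakeRun]
    split
    · rename_i hy
      have h1 : 1 ≤ (pvTakeRun y ys).1 := pvTakeRun_one_le y ys
      rw [PySem.List.pyRange_one_cons (by omega)]
      have := ih y
      subst hy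
      simp only [List.cons_append, List.cons.injEq, true_and]
      convert this using 3
      omega
    · rw [PySem.List.pyRange_one_cons (by omega)]
      rw [PySem.List.pyRange_one_eq_nil (by omega)]
      simp

lemma pvTakeRun_rest_gt (x : Int) (xs : List Int) (hp : (x :: xs).Pairwise (· < ·)) :
    ∀ w ∈ (pvTakeRun x xs).2, x + (pvTakeRun x xs).1 < w := by
  induction xs generalizing x with
  | nil => simp [pvTakeRun]
  | cons y ys ih =>
    simp only [pvTakeRun]
    split
    · rename_i hy
      intro w hw
      have := ih y (hp.sublist (by simp)) w hw
      omega
    · rename_i hy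
      intro w hw
      have hx : ∀ z ∈ y :: ys, x < z := fun z hz => (List.pairwise_cons.1 hp).1 z hz
      have hxy := hx y (by simp)
      rcases List.mem_cons.1 hw with hw | hw
      · omega
      · have h2 : ∀ z ∈ ys, y < z := fun z hz => (List.pairwise_cons.1 (hp.sublist (by simp))).1 z hz
        have := h2 w hw
        have := hx w (by simp [hw])
        omega

lemma pvTakeRun_rest_sublist (x : Int) (xs : List Int) :
    (pvTakeRun x xs).2.Sublist (x :: xs) := by
  conv_rhs => rw [pvTakeRun_decomp x xs]
  exact List.sublist_append_right _ _

-- the abstract form of A's loop: prev = last processed value, state (cur, m, al, ar)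
def pvFoldA : Int → Int × Int × Int × Int → List Int → Int × Int
  | _, (_, _, al, ar), [] => (al, ar)
  | prev, (cur, m, al, ar), y :: ys =>
    if y ≠ prev + 1 then pvFoldA y (y, m, al, ar) ys
    else if y - cur + 1 > m then pvFoldA y (cur, y - cur + 1, cur, y) ys
    else pvFoldA y (cur, m, al, ar) ys

-- best-run recursion shared by both sides: consume one maximal run at a time
def pvRunsA (b : Int × Int) : List Int → Int × Int
  | [] => (b.2, b.2 + b.1 - 1)
  | x :: xs => pvRunsA (if (pvTakeRun x xs).1 > b.1 then ((pvTakeRun x xs).1, x) else b) (pvTakeRun x xs).2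
termination_by l => l.length
decreasing_by
  have h1 := pvTakeRun_one_le x xs
  have h2 := pvTakeRun_len x xs
  simp only [List.length_cons]
  omega

def pvRunsB (b : Option (Int × Int)) : List Int → Option (Int × Int)
  | [] => b
  | x :: xs => pvRunsB (pvBetter b ((pvTakeRun x xs).1, x)) (pvTakeRun x xs).2
termination_by l => l.length
decreasing_by
  have h1 := pvTakeRun_one_le x xs
  have h2 := pvTakeRun_len x xs
  simp only [List.length_cons]
  omega

lemma pvBetter_rc (b : Option (Int × Int)) (c d : Int × Int) :
    pvBetter (pvBetter b c) d = pvBetter (pvBetter b d) c := by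
  rcases b with _ | ⟨bl, bs⟩ <;> rcases c with ⟨c1, c2⟩ <;> rcases d with ⟨d1, d2⟩
  all_goals try simp only [pvBetter]
  all_goals try split_ifs
  all_goals try simp only [pvBetter]
  all_goals try split_ifs
  all_goals
    first
    | rfl
    | (exfalso; omega)
    | (simp only [Option.some.injEq, Prod.mk.injEq, and_true, true_and]; omega)

lemma pvBStep_rc (S : List Int) (F : Nat) : RightCommutative (pvBStep S F) := by
  constructor
  intro b x y
  simp only [pvBStep]
  split_ifs <;> first | rfl | exact pvBetter_rc b _ _

lemma pvWalk_eq (S : List Int) (x L : Int) (hL : 1 ≤ L)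
    (hmem : ∀ i : Int, 1 ≤ i → i < L → x + i ∈ S) (hstop : x + L ∉ S) :
    ∀ (fuel : Nat) (len : Int), 1 ≤ len → len ≤ L → L - len ≤ (fuel : Int) →
      pvWalk S x fuel len = L := by
  intro fuel
  induction fuel with
  | zero => intro len h1 h2 h3; simp only [pvWalk]; omega
  | succ f ih =>
    intro len h1 h2 h3
    simp only [pvWalk]
    by_cases hc : x + len ∈ S
    · rw [if_pos ((PySem.Set.contains_iff S _).2 hc)]
      have hlt : len < L := by
        rcases lt_or_eq_of_le h2 with h | h
        · exact h
        · exact absurd (h ▸ hc) hstop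
      exact ih (len + 1) (by omega) (by omega) (by push_cast; omega)
    · rw [if_neg (by simp only [Bool.not_eq_true]; rw [← Bool.not_eq_true, PySem.Set.contains_iff]; exact hc)]
      have : len = L := by
        by_contra h
        exact hc (hmem len h1 (by omega))
      omega

lemma pvSkipAll (S : List Int) (F : Nat) (l : List Int)
    (h : ∀ y ∈ l, PySem.Set.contains S (y - 1) = true) (b : Option (Int × Int)) :
    l.foldl (pvBStep S F) b = b := by
  induction l generalizing b with
  | nil => rfl
  | cons y ys ih =>
    simp only [List.foldl_cons, pvBStep, if_pos (h y (by simp))]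
    exact ih (fun z hz => h z (by simp [hz])) b

-- B's fold over an ascending list l equals the run recursion, given that the global
-- membership list S consists of l plus only elements at least two below every element of l
lemma pvBFold_runs (S : List Int) (F : Nat) :
    ∀ (N : Nat) (l : List Int) (b : Option (Int × Int)), l.length ≤ N →
      l.Pairwise (· < ·) →
      (∀ z ∈ l, z ∈ S) →
      (∀ z ∈ S, z ∈ l ∨ ∀ w ∈ l, z + 1 < w) →
      l.length ≤ F →
      l.foldl (pvBStep S F) b = pvRunsB b l := by
  intro N
  induction N with
  | zero =>
    intro l b hN _ _ _ _
    have hl : l = [] := List.length_eq_zero_iff.1 (by omega)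
    subst hl
    simp [pvRunsB]
  | succ N ih =>
    intro l b hN hp hmem hsub hF
    match l with
    | [] => simp [pvRunsB]
    | x :: xs =>
      have hL1 := pvTakeRun_one_le x xs
      have hLen := pvTakeRun_len x xs
      have hdec := pvTakeRun_decomp x xs
      have hgt := pvTakeRun_rest_gt x xs hp
      have hmin : ∀ z ∈ x :: xs, x ≤ z := by
        intro z hz
        rcases List.mem_cons.1 hz with rfl | hz'
        · omega
        · have := (List.pairwise_cons.1 hp).1 z hz'; omega
      -- head step: x starts a run of length (pvTakeRun x xs).1
      have hstart : PySem.Set.contains S (x - 1) = false := by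
        rw [← Bool.not_eq_true, PySem.Set.contains_iff]
        intro hmem1
        rcases hsub _ hmem1 with h | h
        · have := hmin _ h; omega
        · have := h x (by simp); omega
      have hwalk : pvWalk S x F 1 = (pvTakeRun x xs).1 := by
        refine pvWalk_eq S x (pvTakeRun x xs).1 hL1 ?_ ?_ F 1 (by omega) hL1 ?_
        · intro i h1 h2
          exact hmem _ (by
            rw [hdec]
            exact List.mem_append_left _ (PySem.List.mem_pyRange_one.2 ⟨by omega, by omega⟩))
        · intro hc
          rcases hsub _ hc with h | h
          · rw [hdec] at h
            rcases List.mem_append.1 h with h | h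
            · have := PySem.List.mem_pyRange_one.1 h; omega
            · have := hgt _ h; omega
          · have := h x (by simp); omega
        · have hF' : ((xs.length : Int) + 1) ≤ (F : Int) := by
            have h0 : (x :: xs).length ≤ F := hF
            simp only [List.length_cons] at h0
            exact_mod_cast h0
          have hrest : (0 : Int) ≤ ((pvTakeRun x xs).2.length : Int) := by positivity
          omega
      have hbody : ∀ y ∈ PySem.List.pyRange (x + 1) (x + (pvTakeRun x xs).1) 1,
          PySem.Set.contains S (y - 1) = true := by
        intro y hy
        have hy' := PySem.List.mem_pyRange_one.1 hy
        rw [PySem.Set.contains_iff]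
        apply hmem
        rw [hdec]
        exact List.mem_append_left _ (PySem.List.mem_pyRange_one.2 ⟨by omega, by omega⟩)
      -- split the fold along the decomposition
      have hsplit : x :: xs = x :: PySem.List.pyRange (x + 1) (x + (pvTakeRun x xs).1) 1 ++ (pvTakeRun x xs).2 := by
        rw [hdec]
        rw [PySem.List.pyRange_one_cons (by omega)]
      conv_lhs => rw [hsplit]
      rw [List.cons_append, List.foldl_cons, List.foldl_append]
      have hxstep : pvBStep S F b x = pvBetter b ((pvTakeRun x xs).1, x) := by
        simp only [pvBStep, hstart, Bool.false_eq_true, if_false, hwalk]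
      rw [hxstep, pvSkipAll S F _ hbody]
      -- recurse on the rest
      have hrest_len : (pvTakeRun x xs).2.length ≤ N := by
        simp only [List.length_cons] at hN
        omega
      rw [ih (pvTakeRun x xs).2 _ hrest_len
        (hp.sublist (pvTakeRun_rest_sublist x xs))
        (fun z hz => hmem z ((pvTakeRun_rest_sublist x xs).mem hz))
        (fun z hz => by
          rcases hsub z hz with h | h
          · rw [hdec] at h
            rcases List.mem_append.1 h with h | h
            · right
              intro w hw
              have h1 := PySem.List.mem_pyRange_one.1 h
              have h2 := hgt w hw
              omega
            · exact Or.inl h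
          · exact Or.inr fun w hw => h w ((pvTakeRun_rest_sublist x xs).mem hw))
        (by
          have h5 := (pvTakeRun_rest_sublist x xs).length_le
          simp only [List.length_cons] at h5 hF
          omega)]
      rw [pvRunsB]

-- A's inner fold (with explicit indices) equals pvFoldA on the dropped suffix
lemma pvAFold_idx (g : List Int) :
    ∀ (d j left : Nat) (m al ar : Int), g.length - j ≤ d → 1 ≤ j → j ≤ g.length → left < j →
      g.getD left 0 + ((j : Int) - 1 - (left : Int)) = g.getD (j - 1) 0 →
      (let st := (PySem.List.pyRange (j : Int) ((g.length : Nat) : Int) 1).foldl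
        (fun (s : Int × Int × Int × Int) r =>
          if PySem.List.pyGetD g r 0 ≠ PySem.List.pyGetD g (r - 1) 0 + 1 then
            (r, s.2.1, s.2.2.1, s.2.2.2)
          else if r - s.1 + 1 > s.2.1 then
            (s.1, r - s.1 + 1, PySem.List.pyGetD g s.1 0, PySem.List.pyGetD g r 0)
          else s)
        ((left : Int), m, al, ar)
       (st.2.2.1, st.2.2.2)) =
      pvFoldA (g.getD (j - 1) 0) (g.getD left 0, m, al, ar) (g.drop j) := by
  intro d
  induction d with
  | zero =>
    intro j left m al ar hd h1 h2 h3 hinv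
    have hj : j = g.length := by omega
    subst hj
    rw [PySem.List.pyRange_one_eq_nil (by omega), List.drop_length]
    rfl
  | succ d ih =>
    intro j left m al ar hd h1 h2 h3 hinv
    rcases Nat.lt_or_ge j g.length with hj | hj
    · rw [PySem.List.pyRange_one_cons (by exact_mod_cast hj), List.foldl_cons]
      have hgj : PySem.List.pyGetD g (j : Int) 0 = g.getD j 0 := PySem.List.pyGetD_natCast g j 0
      have hgj1 : PySem.List.pyGetD g ((j : Int) - 1) 0 = g.getD (j - 1) 0 := by
        have : ((j : Int) - 1) = ((j - 1 : Nat) : Int) := by push_cast; omega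
        rw [this, PySem.List.pyGetD_natCast]
      have hgl : PySem.List.pyGetD g ((left : Int)) 0 = g.getD left 0 := PySem.List.pyGetD_natCast g left 0
      have hdrop : g.drop j = g[j] :: g.drop (j + 1) := List.drop_eq_getElem_cons hj
      have hgetD : g.getD j 0 = g[j] := List.getD_eq_getElem g 0 hj
      have hcast : ((j : Int) + 1) = ((j + 1 : Nat) : Int) := by push_cast; ring
      by_cases hb1 : g.getD j 0 ≠ g.getD (j - 1) 0 + 1
      · rw [if_pos (by rw [hgj, hgj1]; exact hb1)]
        have := ih (j + 1) j m al ar (by omega) (by omega) (by omega) (by omega)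
          (by simp only [Nat.add_sub_cancel]; push_cast; ring)
        rw [hcast]
        rw [this]
        rw [hdrop, pvFoldA, if_pos (by rw [← hgetD]; exact hb1)]
        rw [Nat.add_sub_cancel, hgetD]
      · push_neg at hb1
        rw [if_neg (by rw [hgj, hgj1]; simpa using hb1)]
        have hval : g.getD j 0 - g.getD left 0 = (j : Int) - (left : Int) := by omega
        by_cases hb2 : (j : Int) - (left : Int) + 1 > m
        · rw [if_pos hb2]
          have := ih (j + 1) left ((j : Int) - (left : Int) + 1) (g.getD left 0) (g.getD j 0)
            (by omega) (by omega) (by omega) (by omega)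
            (by simp only [Nat.add_sub_cancel]; push_cast at hinv ⊢; omega)
          rw [hcast, hgl, hgj]
          rw [this]
          rw [hdrop, pvFoldA, if_neg (by rw [← hgetD]; omega)]
          rw [if_pos (by rw [← hgetD]; omega)]
          rw [Nat.add_sub_cancel, hgetD]
          have he1 : g[j] - g.getD left 0 + 1 = (j : Int) - (left : Int) + 1 := by rw [← hgetD]; omega
          rw [he1]
        · rw [if_neg hb2]
          have := ih (j + 1) left m al ar (by omega) (by omega) (by omega) (by omega)
            (by simp only [Nat.add_sub_cancel]; push_cast at hinv ⊢; omega)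
          rw [hcast]
          rw [this]
          rw [hdrop, pvFoldA, if_neg (by rw [← hgetD]; omega)]
          rw [if_neg (by rw [← hgetD]; omega)]
          rw [Nat.add_sub_cancel, hgetD]
    · have hj' : j = g.length := by omega
      subst hj'
      rw [PySem.List.pyRange_one_eq_nil (by omega), List.drop_length]
      rfl

-- A's abstract loop, started inside a run c..x whose information is already absorbed in (m, al),
-- processes exactly one maximal run extension and then recurses at the next run head
def pvCont (b : Int × Int) : List Int → Int × Int
  | [] => (b.2, b.2 + b.1 - 1)
  | y :: ys => pvFoldA y (y, b.1, b.2, b.2 + b.1 - 1) ys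

-- A's abstract loop, started inside a run c..x whose information is already absorbed in (m, al),
-- processes exactly one maximal run extension and then recurses at the next run head
lemma pvFoldA_run :
    ∀ (xs : List Int) (x c m al : Int),
      (x :: xs).Pairwise (· < ·) → c ≤ x → 1 ≤ m →
      (x - c + 1 ≤ m ∨ (m = x - c + 1 ∧ al = c)) →
      pvFoldA x (c, m, al, al + m - 1) xs =
        pvCont (if x - c + (pvTakeRun x xs).1 > m then (x - c + (pvTakeRun x xs).1, c) else (m, al)) (pvTakeRun x xs).2 := by
  intro xs
  induction xs with
  | nil =>
    intro x c m al hp hcx hm habs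
    have hb' : (if x - c + (pvTakeRun x ([] : List Int)).1 > m then (x - c + (pvTakeRun x ([] : List Int)).1, c) else (m, al)) = (m, al) := by
      simp only [pvTakeRun]
      rcases habs with h | ⟨h1, h2⟩ <;> rw [if_neg (by omega)]
    rw [hb']
    simp only [pvTakeRun, pvFoldA, pvCont]
  | cons y ys ih =>
    intro x c m al hp hcx hm habs
    by_cases hy : y = x + 1
    · subst hy
      have hT1 := pvTakeRun_one_le (x + 1) ys
      have htr : pvTakeRun x ((x + 1) :: ys) = ((pvTakeRun (x + 1) ys).1 + 1, (pvTakeRun (x + 1) ys).2) := by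
        simp [pvTakeRun]
      rw [htr]
      simp only [pvFoldA, if_neg (by omega : ¬(x + 1 ≠ x + 1))]
      by_cases hb2 : x + 1 - c + 1 > m
      · rw [if_pos hb2]
        have harr : (x + 1 : Int) = c + (x + 1 - c + 1) - 1 := by ring
        have hrec := ih (x + 1) c (x + 1 - c + 1) c (hp.sublist (by simp)) (by omega) (by omega)
          (Or.inr ⟨rfl, rfl⟩)
        rw [show pvFoldA (x + 1) (c, x + 1 - c + 1, c, x + 1) ys
            = pvFoldA (x + 1) (c, x + 1 - c + 1, c, c + (x + 1 - c + 1) - 1) ys by rw [← harr]]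
        rw [hrec]
        have hbeq : (if x + 1 - c + (pvTakeRun (x + 1) ys).1 > x + 1 - c + 1 then (x + 1 - c + (pvTakeRun (x + 1) ys).1, c) else (x + 1 - c + 1, c))
            = (if x - c + ((pvTakeRun (x + 1) ys).1 + 1) > m then (x - c + ((pvTakeRun (x + 1) ys).1 + 1), c) else (m, al)) := by
          rw [show (if x - c + ((pvTakeRun (x + 1) ys).1 + 1) > m then (x - c + ((pvTakeRun (x + 1) ys).1 + 1), c) else (m, al)) = (x - c + ((pvTakeRun (x + 1) ys).1 + 1), c) from if_pos (by omega)]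
          split_ifs with h
          · rw [show x + 1 - c + (pvTakeRun (x + 1) ys).1 = x - c + ((pvTakeRun (x + 1) ys).1 + 1) from by ring]
          · have h1 : (pvTakeRun (x + 1) ys).1 = 1 := by omega
            rw [h1]
            rw [show x + 1 - c + 1 = x - c + (1 + 1) from by ring]
        rw [hbeq]
      · rw [if_neg hb2]
        have hrec := ih (x + 1) c m al (hp.sublist (by simp)) (by omega) hm (Or.inl (by omega))
        rw [hrec]
        have hbeq : (if x + 1 - c + (pvTakeRun (x + 1) ys).1 > m then (x + 1 - c + (pvTakeRun (x + 1) ys).1, c) else (m, al))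
            = (if x - c + ((pvTakeRun (x + 1) ys).1 + 1) > m then (x - c + ((pvTakeRun (x + 1) ys).1 + 1), c) else (m, al)) := by
          split_ifs with h1 h2 h2 <;>
            first
            | rfl
            | (exfalso; omega)
            | (simp only [Prod.mk.injEq, and_true, true_and]; omega)
        rw [hbeq]
    · have htr : pvTakeRun x (y :: ys) = (1, y :: ys) := by simp [pvTakeRun, hy]
      rw [htr]
      have hb' : (if x - c + 1 > m then (x - c + 1, c) else (m, al)) = (m, al) := by
        rcases habs with h | ⟨h1, h2⟩ <;> rw [if_neg (by omega)]
      rw [hb']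
      simp only [pvFoldA, if_pos hy, pvCont]

lemma pvCont_runsA :
    ∀ (N : Nat) (l : List Int) (b : Int × Int), l.length ≤ N →
      l.Pairwise (· < ·) → 1 ≤ b.1 →
      pvCont b l = pvRunsA b l := by
  intro N
  induction N with
  | zero =>
    intro l b hN hp hb
    have hl : l = [] := List.length_eq_zero_iff.1 (by omega)
    subst hl
    rw [pvRunsA]
    rfl
  | succ N ih =>
    intro l b hN hp hb
    match l with
    | [] => rw [pvRunsA]; rfl
    | x :: xs =>
      have hT1 := pvTakeRun_one_le x xs
      have hT2 := pvTakeRun_len x xs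
      have hcont : pvCont b (x :: xs) = pvFoldA x (x, b.1, b.2, b.2 + b.1 - 1) xs := rfl
      rw [hcont, pvFoldA_run xs x x b.1 b.2 hp le_rfl hb (Or.inl (by omega))]
      have hsimp : x - x + (pvTakeRun x xs).1 = (pvTakeRun x xs).1 := by ring
      rw [hsimp]
      have hbe : (b.1, b.2) = b := rfl
      rw [hbe, pvRunsA]
      apply ih
      · simp only [List.length_cons] at hN; omega
      · exact hp.sublist (pvTakeRun_rest_sublist x xs)
      · split_ifs with h
        · exact hT1
        · exact hb

-- render B's optional best as A's answer pair
lemma pvRunsB_runsA :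
    ∀ (N : Nat) (l : List Int) (m al : Int), l.length ≤ N →
      l.Pairwise (· < ·) → 1 ≤ m → (∀ w ∈ l, al < w) →
      (match pvRunsB (some (m, al)) l with
       | none => ((-1 : Int), (-1 : Int))
       | some (bl, bs) => (bs, bs + bl - 1)) = pvRunsA (m, al) l := by
  intro N
  induction N with
  | zero =>
    intro l m al hN hp hm hal
    have hl : l = [] := List.length_eq_zero_iff.1 (by omega)
    subst hl
    rw [pvRunsB, pvRunsA]
  | succ N ih =>
    intro l m al hN hp hm hal
    match l with
    | [] => rw [pvRunsB, pvRunsA]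
    | x :: xs =>
      rw [pvRunsB, pvRunsA]
      have hT1 := pvTakeRun_one_le x xs
      have hT2 := pvTakeRun_len x xs
      have hgt := pvTakeRun_rest_gt x xs hp
      have halx : al < x := hal x (by simp)
      have hbet : pvBetter (some (m, al)) ((pvTakeRun x xs).1, x)
          = some (if (pvTakeRun x xs).1 > m then ((pvTakeRun x xs).1, x) else (m, al)) := by
        simp only [pvBetter]
        split_ifs with h1 h2 h2
        · rfl
        · exfalso; rcases h1 with h | h <;> omega
        · exact absurd (Or.inl h2) h1
        · rfl
      rw [hbet]
      rcases hsplit : (if (pvTakeRun x xs).1 > m then ((pvTakeRun x xs).1, x) else (m, al)) with ⟨m2, al2⟩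
      have hm2 : 1 ≤ m2 ∧ (al2 = x ∨ al2 = al) := by
        split_ifs at hsplit <;> (injection hsplit with e1 e2; subst e1; subst e2; constructor)
        · omega
        · exact Or.inl rfl
        · omega
        · exact Or.inr rfl
      apply ih
      · simp only [List.length_cons] at hN; omega
      · exact hp.sublist (pvTakeRun_rest_sublist x xs)
      · exact hm2.1
      · intro w hw
        have := hgt w hw
        rcases hm2.2 with h | h <;> omega

lemma pvGood_nodup (k : Int) (a : List Int) :
    ((PySem.Dict.counter a).items.filterMap (fun p => if p.2 ≥ k then some p.1 else none)).Nodup := by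
  rw [PySem.Dict.items_counter, List.filterMap_map]
  apply List.Nodup.filterMap
  · intro u v b hb hb'
    simp only [Function.comp] at hb hb'
    split_ifs at hb hb' <;> simp_all
  · exact PySem.Set.nodup_ofList a

theorem pv_main (n k : Int) (a : List Int) :
    find_longest_good_subsequence n k a = find_longest_good_subsequence_alt n k a := by
  set t := ((PySem.Dict.counter a).items.filterMap (fun p => if p.2 ≥ k then some p.1 else none)) with ht
  have htnodup : t.Nodup := pvGood_nodup k a
  have hofl : PySem.Set.ofList t = t := PySem.Set.ofList_eq_self_of_nodup t htnodup
  set g := PySem.List.sorted t (fun v => v) false with hg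
  have hperm : g.Perm t := PySem.List.sorted_perm t (fun v => v) false
  have hpair : g.Pairwise (· < ·) := by
    have h1 : g.Pairwise (fun u v => u ≤ v) := PySem.List.sorted_pairwise t (fun v => v)
    have h2 : g.Nodup := hperm.nodup_iff.2 htnodup
    exact (h1.and h2).imp (fun h => lt_of_le_of_ne h.1 h.2)
  have hAdef : find_longest_good_subsequence n k a =
      (if g = [] then ((-1 : Int), (-1 : Int))
       else
        (((PySem.List.pyRange 1 (PySem.List.len g) 1).foldl
          (fun (s : Int × Int × Int × Int) r =>
            if PySem.List.pyGetD g r 0 ≠ PySem.List.pyGetD g (r - 1) 0 + 1 then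
              (r, s.2.1, s.2.2.1, s.2.2.2)
            else if r - s.1 + 1 > s.2.1 then
              (s.1, r - s.1 + 1, PySem.List.pyGetD g s.1 0, PySem.List.pyGetD g r 0)
            else s)
          (0, 1, PySem.List.pyGetD g 0 0, PySem.List.pyGetD g 0 0)).2.2.1,
         ((PySem.List.pyRange 1 (PySem.List.len g) 1).foldl
          (fun (s : Int × Int × Int × Int) r =>
            if PySem.List.pyGetD g r 0 ≠ PySem.List.pyGetD g (r - 1) 0 + 1 then
              (r, s.2.1, s.2.2.1, s.2.2.2)
            else if r - s.1 + 1 > s.2.1 then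
              (s.1, r - s.1 + 1, PySem.List.pyGetD g s.1 0, PySem.List.pyGetD g r 0)
            else s)
          (0, 1, PySem.List.pyGetD g 0 0, PySem.List.pyGetD g 0 0)).2.2.2)) := rfl
  have hBdef : find_longest_good_subsequence_alt n k a =
      (match (PySem.Set.ofList t).foldl (pvBStep (PySem.Set.ofList t) (PySem.Set.ofList t).length) none with
       | none => ((-1 : Int), (-1 : Int))
       | some (bl, bs) => (bs, bs + bl - 1)) := rfl
  rw [hofl] at hBdef
  haveI : RightCommutative (pvBStep t t.length) := pvBStep_rc t t.length
  rw [← List.Perm.foldl_eq (f := pvBStep t t.length) hperm none] at hBdef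
  have hBruns : g.foldl (pvBStep t t.length) none = pvRunsB none g := by
    apply pvBFold_runs t t.length g.length g none le_rfl hpair
    · intro z hz; exact hperm.mem_iff.1 hz
    · intro z hz; exact Or.inl (hperm.mem_iff.2 hz)
    · exact le_of_eq hperm.length_eq
  rw [hBruns] at hBdef
  rw [hAdef, hBdef]
  clear hAdef hBdef hBruns ht hg hofl
  clear_value g t
  rcases g with _ | ⟨x, xs⟩
  · simp [pvRunsB]
  · rw [if_neg (by simp)]
    have hT1 := pvTakeRun_one_le x xs
    have hgt := pvTakeRun_rest_gt x xs hpair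
    -- A side: index fold = pvFoldA = pvCont = pvRunsA
    have hidx := pvAFold_idx (x :: xs) ((x :: xs).length - 1) 1 0 1
      (PySem.List.pyGetD (x :: xs) 0 0) (PySem.List.pyGetD (x :: xs) 0 0)
      (by omega) le_rfl (by simp) (by omega) (by simp)
    simp only [PySem.List.len_eq, Nat.cast_one, Nat.cast_zero, Nat.sub_self,
      PySem.List.pyGetD_zero_cons, List.getD_cons_zero, List.drop_one, List.tail_cons] at hidx
    have hgoalA : (((PySem.List.pyRange 1 ((x :: xs).length : Int) 1).foldl
          (fun (s : Int × Int × Int × Int) r =>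
            if PySem.List.pyGetD (x :: xs) r 0 ≠ PySem.List.pyGetD (x :: xs) (r - 1) 0 + 1 then
              (r, s.2.1, s.2.2.1, s.2.2.2)
            else if r - s.1 + 1 > s.2.1 then
              (s.1, r - s.1 + 1, PySem.List.pyGetD (x :: xs) s.1 0, PySem.List.pyGetD (x :: xs) r 0)
            else s)
          (0, 1, x, x)).2.2.1,
        ((PySem.List.pyRange 1 ((x :: xs).length : Int) 1).foldl
          (fun (s : Int × Int × Int × Int) r =>
            if PySem.List.pyGetD (x :: xs) r 0 ≠ PySem.List.pyGetD (x :: xs) (r - 1) 0 + 1 then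
              (r, s.2.1, s.2.2.1, s.2.2.2)
            else if r - s.1 + 1 > s.2.1 then
              (s.1, r - s.1 + 1, PySem.List.pyGetD (x :: xs) s.1 0, PySem.List.pyGetD (x :: xs) r 0)
            else s)
          (0, 1, x, x)).2.2.2) = pvFoldA x (x, 1, x, x) xs := hidx
    simp only [PySem.List.len_eq, PySem.List.pyGetD_zero_cons]
    rw [hgoalA]
    have hcont : pvFoldA x (x, 1, x, x) xs = pvCont (1, x) (x :: xs) := by
      show pvFoldA x (x, 1, x, x) xs = pvFoldA x (x, 1, x, x + 1 - 1) xs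
      rw [show x + 1 - 1 = x from by ring]
    rw [hcont, pvCont_runsA (x :: xs).length (x :: xs) (1, x) le_rfl hpair le_rfl]
    -- B side
    rw [pvRunsA, pvRunsB]
    rw [show pvBetter none ((pvTakeRun x xs).1, x) = some ((pvTakeRun x xs).1, x) from rfl]
    rw [show (if (pvTakeRun x xs).1 > (1, x).1 then ((pvTakeRun x xs).1, x) else (1, x)) = ((pvTakeRun x xs).1, x) from by
      split_ifs with h
      · rfl
      · have h1 : (pvTakeRun x xs).1 = 1 := by omega
        rw [h1]]
    exact (pvRunsB_runsA (pvTakeRun x xs).2.length (pvTakeRun x xs).2 (pvTakeRun x xs).1 x le_rfl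
      (hpair.sublist (pvTakeRun_rest_sublist x xs)) hT1
      (fun w hw => by have := hgt w hw; omega)).symm

-- ===== VERDICT (by name: the statement is the Claim_ definition above) =====
theorem find_longest_good_subsequence_spec : Claim_equal_find_longest_good_subsequence := by
  intro n k a _
  unfold Spec_find_longest_good_subsequence
  exact pv_main n k a
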